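-- pv_equiv track=rewrite | github.com/rado0x54/project-euler | python/problem0040.py | problem41
-- ===== SOURCE A (Python) =====
-- def problem41(limit):
--     """Problem 41 - Champernowne's constant"""
--     i = 0
--     str_number = ''
--     while len(str_number) <= limit:
--         str_number += str(i)
--         i += 1
--
--     d = 1
--     result = 1
--     while d <= limit:
--         result *= int(str_number[d])
--         d *= 10
--
--     return result
-- ===== SOURCE B (Python) =====
-- def problem41(limit):
--     """Problem 41 - Champernowne's constant"""
--     result = 1
--     d = 1
--     while d <= limit:
--         # locate digit number d of "0123456789101112..." arithmetically:
--         # skip whole blocks of k-digit numbers instead of building the string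
--         pos = d            # position among digits of numbers >= 1 (1-based)
--         k = 1              # current block: numbers with k digits
--         count = 9          # how many k-digit numbers there are
--         start = 1          # first k-digit number
--         while pos > k * count:
--             pos -= k * count
--             k += 1
--             count *= 10
--             start *= 10
--         num = start + (pos - 1) // k
--         r = (pos - 1) % k
--         result *= (num // 10 ** (k - 1 - r)) % 10
--         d *= 10
--     return result
-- ===== Notes on version B (the rewrite author's own statement) =====
-- stated objective: faster
-- what changed: Instead of materialising the whole concatenated string '0123456789101112...' up to the limit and indexing into it, B computes each needed digit directly with the Champernowne nth-digit formula (skip whole blocks of k-digit numbers arithmetically, then extract the digit by division and modulus).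
import Mathlib
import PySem

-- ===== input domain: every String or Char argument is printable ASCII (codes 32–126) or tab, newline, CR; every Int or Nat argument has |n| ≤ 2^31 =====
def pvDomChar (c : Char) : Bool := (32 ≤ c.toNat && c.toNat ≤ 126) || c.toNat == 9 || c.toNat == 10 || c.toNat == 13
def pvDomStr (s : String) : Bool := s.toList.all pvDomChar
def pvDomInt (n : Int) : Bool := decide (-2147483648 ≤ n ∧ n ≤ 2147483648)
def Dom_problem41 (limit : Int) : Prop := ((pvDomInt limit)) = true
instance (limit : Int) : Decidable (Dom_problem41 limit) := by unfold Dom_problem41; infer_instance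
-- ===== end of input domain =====

-- B replaces A's O(limit) construction of the concatenated string "0123456789101112…" by a
-- direct arithmetic computation of each needed digit (Champernowne nth-digit formula).

-- ===== PORT A =====

-- two facts cited by the ports' termination proofs (str(i) is never empty):
theorem pvDigitsCoreEq : ∀ (f n : ℕ), 0 < n → n < f → ∀ acc,
    Nat.toDigitsCore 10 f n acc = ((Nat.digits 10 n).map Nat.digitChar).reverse ++ acc := by
  intro f
  induction f with
  | zero => intro n h1 h2; omega
  | succ f ih =>
    intro n h1 h2 acc
    rw [Nat.toDigitsCore]
    rw [Nat.digits_def' (by norm_num : 1 < 10) h1]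
    by_cases h : n / 10 = 0
    · simp [h]
    · rw [if_neg h, ih (n / 10) (Nat.pos_of_ne_zero h) (by omega)]
      simp

theorem pvToCharsNeNil (n : Int) : 1 ≤ (PySem.Int.toChars n).length := by
  unfold PySem.Int.toChars
  split
  · simp
  · rcases Nat.eq_zero_or_pos n.toNat with h | h
    · rw [h]; decide
    · rw [Nat.toDigits, pvDigitsCoreEq (n.toNat + 1) n.toNat h (by omega), List.append_nil]
      have : Nat.digits 10 n.toNat ≠ [] := Nat.digits_ne_nil_iff_ne_zero.mpr (by omega)
      simp only [List.length_reverse, List.length_map]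
      exact List.length_pos_of_ne_nil this

-- while len(str_number) <= limit: str_number += str(i); i += 1
def probA_build (limit : Int) (i : Int) (s : String) : String :=
  if PySem.Str.len s ≤ limit then probA_build limit (i + 1) (s ++ PySem.Int.toStr i) else s
  termination_by (limit + 1 - PySem.Str.len s).toNat
  decreasing_by
    have h1 := pvToCharsNeNil i
    have h2 : (s ++ PySem.Int.toStr i).toList = s.toList ++ PySem.Int.toChars i := by
      rw [String.toList_append, PySem.Int.toList_toStr]
    have h3 : ((s ++ PySem.Int.toStr i).toList.length : Int) =
        (s.toList.length : Int) + ((PySem.Int.toChars i).length : Int) := by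
      rw [h2]; push_cast [List.length_append]; ring
    simp only [PySem.Str.len_eq] at *
    omega

-- while d <= limit: result *= int(str_number[d]); d *= 10
-- (the `1 ≤ d` argument only justifies termination; `.getD 0` is never taken: the index is
--  always in range and the character is always a decimal digit, so Python never raises here)
def probA_digits (limit : Int) (s : String) (d result : Int) (hd : 1 ≤ d) : Int :=
  if d ≤ limit then
    probA_digits limit s (d * 10)
      (result * ((PySem.Str.pyGet? s d).bind (fun c => PySem.Int.ofChars? [c])).getD 0)
      (by omega)
  else result
  termination_by (limit + 1 - d).toNat
  decreasing_by
    have : d + 9 ≤ d * 10 := by nlinarith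
    omega

def problem41 (limit : Int) : Int :=
  probA_digits limit (probA_build limit 0 "") 1 1 (by norm_num)

-- ===== PORT B =====

-- while pos > k * count: pos -= k*count; k += 1; count *= 10; start *= 10
-- (the `1 ≤ k`, `1 ≤ count` arguments only justify termination)
def probB_find (pos k count start : Int) (hk : 1 ≤ k) (hc : 1 ≤ count) : Int × Int × Int :=
  if k * count < pos then
    probB_find (pos - k * count) (k + 1) (count * 10) (start * 10) (by omega) (by linarith)
  else (pos, k, start)
  termination_by pos.toNat
  decreasing_by
    have : 1 ≤ k * count := by nlinarith
    omega

-- while d <= limit: (find block) ; result *= (num // 10**(k-1-r)) % 10 ; d *= 10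
def probB_loop (limit d result : Int) (hd : 1 ≤ d) : Int :=
  if d ≤ limit then
    let t := probB_find d 1 9 1 (by norm_num) (by norm_num)
    let num := t.2.2 + PySem.Int.floordiv (t.1 - 1) t.2.1
    let r := PySem.Int.mod (t.1 - 1) t.2.1
    probB_loop limit (d * 10)
      (result * PySem.Int.mod (PySem.Int.floordiv num (10 ^ (t.2.1 - 1 - r).toNat)) 10)
      (by omega)
  else result
  termination_by (limit + 1 - d).toNat
  decreasing_by
    have : d + 9 ≤ d * 10 := by nlinarith
    omega

def problem41_alt (limit : Int) : Int := probB_loop limit 1 1 (by norm_num)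

-- ===== PRECONDITION & SPEC =====
def Spec_problem41 (limit : Int) (out : Int) : Prop := out = problem41_alt limit
instance (limit : Int) (out : Int) : Decidable (Spec_problem41 limit out) := by unfold Spec_problem41; infer_instance

-- ===== CLAIM (what is proved, stated in full; the proofs are below) =====
def Claim_equal_problem41 : Prop := ∀ (limit : Int), Dom_problem41 limit → Spec_problem41 limit (problem41 limit)

-- ===== LEMMAS AND PROOFS =====

-- the concatenation "0123456789101112…" of the decimal representations of 0,…,n-1
def champ (n : ℕ) : List Char := (List.range n).flatMap (fun m => Nat.toDigits 10 m)

-- length of champ (10 ^ k)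
def Lsum : ℕ → ℕ
  | 0 => 1
  | k + 1 => Lsum k + 9 * 10 ^ k * (k + 1)

theorem toDigitsEq (n : ℕ) (h : 0 < n) :
    Nat.toDigits 10 n = ((Nat.digits 10 n).map Nat.digitChar).reverse := by
  rw [Nat.toDigits, pvDigitsCoreEq (n + 1) n h (by omega), List.append_nil]

theorem champ_add (n m : ℕ) :
    champ (n + m) = champ n ++ (List.range' n m).flatMap (fun x => Nat.toDigits 10 x) := by
  unfold champ
  rw [List.range_add, List.flatMap_append, List.range'_eq_map_range, List.flatMap_map]

theorem champ_succ (n : ℕ) : champ (n + 1) = champ n ++ Nat.toDigits 10 n := by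
  rw [champ_add]; simp

theorem lenToDigits (k m : ℕ) (h1 : 10 ^ k ≤ m) (h2 : m < 10 ^ (k + 1)) :
    (Nat.toDigits 10 m).length = k + 1 := by
  have hm : 0 < m := lt_of_lt_of_le (Nat.pow_pos (by norm_num)) h1
  rw [toDigitsEq m hm, List.length_reverse, List.length_map]
  have hle := (Nat.digits_length_le_iff (by norm_num : 1 < 10) m).mpr h2
  have hgt : ¬ (Nat.digits 10 m).length ≤ k := by
    rw [Nat.digits_length_le_iff (by norm_num : 1 < 10) m]; omega
  omega

theorem champ_pow_len (k : ℕ) : (champ (10 ^ k)).length = Lsum k := by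
  induction k with
  | zero => decide
  | succ k ih =>
    have h : 10 ^ (k + 1) = 10 ^ k + 9 * 10 ^ k := by ring
    rw [h, champ_add, List.length_append, ih]
    have : ((List.range' (10 ^ k) (9 * 10 ^ k)).flatMap (fun x => Nat.toDigits 10 x)).length
        = 9 * 10 ^ k * (k + 1) := by
      rw [List.length_flatMap]
      have : (List.map (fun a => (Nat.toDigits 10 a).length) (List.range' (10 ^ k) (9 * 10 ^ k)))
          = List.map (fun _ => k + 1) (List.range' (10 ^ k) (9 * 10 ^ k)) := by
        apply List.map_congr_left
        intro a ha
        rw [List.mem_range'_1] at ha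
        exact lenToDigits k a ha.1 (lt_of_lt_of_le ha.2 (le_of_eq (by ring)))
      rw [this, List.map_const', List.sum_replicate, List.length_range', smul_eq_mul]
    rw [this, Lsum]

-- indexing into a concatenation of equal-length blocks
theorem flatMapGet {α β : Type} (k : ℕ) (f : β → List α) :
    ∀ (l : List β) (q r : ℕ), (∀ x ∈ l, (f x).length = k) → r < k → (hq : q < l.length) →
    (l.flatMap f)[k * q + r]? = (f l[q])[r]? := by
  intro l
  induction l with
  | nil => intro q r _ _ hq; simp at hq
  | cons x t ih =>
    intro q r hlen hr hq
    rw [List.flatMap_cons]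
    cases q with
    | zero =>
      simp only [Nat.mul_zero, Nat.zero_add]
      rw [List.getElem?_append_left (by rw [hlen x (by simp)]; omega)]
      simp
    | succ q =>
      have hx : (f x).length = k := hlen x (by simp)
      have : k * (q + 1) + r = (f x).length + (k * q + r) := by rw [hx]; ring
      rw [this, List.getElem?_append_right (by omega)]
      have : (f x).length + (k * q + r) - (f x).length = k * q + r := by omega
      rw [this, ih q r (fun y hy => hlen y (by simp [hy])) hr (by simpa using hq)]
      simp

theorem digitsGetSome (m i : ℕ) (hi : i < (Nat.digits 10 m).length) :
    (Nat.digits 10 m)[i]? = some (m / 10 ^ i % 10) := by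
  rw [List.getElem?_eq_getElem hi]
  have := Nat.getD_digits m i (by norm_num : 2 ≤ 10)
  rw [List.getD_eq_getElem _ _ hi] at this
  rw [this]

-- the digit of the Champernowne string at a position inside the block of (k+1)-digit numbers
theorem champ_get (k q r : ℕ) (hq : q < 9 * 10 ^ k) (hr : r ≤ k) :
    (champ (10 ^ (k + 1)))[Lsum k + (k + 1) * q + r]? =
      some (Nat.digitChar ((10 ^ k + q) / 10 ^ (k - r) % 10)) := by
  have hsplit : (10 : ℕ) ^ (k + 1) = 10 ^ k + 9 * 10 ^ k := by ring
  rw [hsplit, champ_add]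
  rw [List.getElem?_append_right (by rw [champ_pow_len]; omega)]
  rw [champ_pow_len]
  have hidx : Lsum k + (k + 1) * q + r - Lsum k = (k + 1) * q + r := by omega
  rw [hidx]
  have hlen : ∀ x ∈ List.range' (10 ^ k) (9 * 10 ^ k), (Nat.toDigits 10 x).length = k + 1 := by
    intro x hx
    rw [List.mem_range'_1] at hx
    exact lenToDigits k x hx.1 (lt_of_lt_of_le hx.2 (le_of_eq (by ring)))
  rw [flatMapGet (k + 1) _ _ q r hlen (by omega) (by simpa using hq)]
  have hel : (List.range' (10 ^ k) (9 * 10 ^ k))[q]'(by simpa using hq) = 10 ^ k + q := by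
    rw [List.getElem_range']; ring
  rw [hel]
  have hnum : 0 < 10 ^ k + q := by positivity
  rw [toDigitsEq _ hnum]
  have hdl : (Nat.digits 10 (10 ^ k + q)).length = k + 1 := by
    have h2 : 10 ^ k + q < 10 ^ (k + 1) := by
      calc 10 ^ k + q < 10 ^ k + 9 * 10 ^ k := by omega
           _ = 10 ^ (k + 1) := by ring
    have h3 := lenToDigits k (10 ^ k + q) (by omega) h2
    rwa [toDigitsEq _ hnum, List.length_reverse, List.length_map] at h3
  rw [List.getElem?_reverse (by rw [List.length_map, hdl]; omega)]
  rw [List.length_map, hdl]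
  have : k + 1 - 1 - r = k - r := by omega
  rw [this, List.getElem?_map, digitsGetSome _ _ (by omega)]
  simp

-- champ n is a prefix of champ m for n ≤ m
theorem champ_mono (n m i : ℕ) (h : n ≤ m) (hi : i < (champ n).length) :
    (champ m)[i]? = (champ n)[i]? := by
  obtain ⟨d, rfl⟩ := Nat.exists_eq_add_of_le h
  rw [champ_add, List.getElem?_append_left hi]

theorem ofCharsDigit (v : ℕ) (h : v < 10) :
    PySem.Int.ofChars? [Nat.digitChar v] = some (v : Int) := by
  interval_cases v <;> decide

-- B's inner skip-loop invariant: it lands in the block that contains digit position pos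
theorem find_inv (pos k count start : Int) (hk : 1 ≤ k) (hc : 1 ≤ count) :
    ∀ κ : ℕ, k = (κ : Int) + 1 → count = 9 * 10 ^ κ → start = 10 ^ κ → 1 ≤ pos →
    ∃ (κ' : ℕ) (pos' : Int),
      probB_find pos k count start hk hc = (pos', (κ' : Int) + 1, (10 : Int) ^ κ') ∧
      1 ≤ pos' ∧ pos' ≤ ((κ' : Int) + 1) * (9 * 10 ^ κ') ∧
      pos + (Lsum κ : Int) = pos' + (Lsum κ' : Int) := by
  fun_induction probB_find with
  | case1 pos k count start hk hc hlt ih =>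
    intro κ hkk hcc hss hpos
    obtain ⟨κ', pos', heq, h1, h2, h3⟩ :=
      ih (κ + 1) (by push_cast [hkk]; ring) (by push_cast [hcc]; ring)
        (by push_cast [hss]; ring) (by omega)
    refine ⟨κ', pos', heq, h1, h2, ?_⟩
    have : (Lsum (κ + 1) : Int) = (Lsum κ : Int) + 9 * 10 ^ κ * ((κ : Int) + 1) := by
      show ((Lsum κ + 9 * 10 ^ κ * (κ + 1) : ℕ) : Int) = _
      push_cast; ring
    rw [this] at h3
    rw [hkk, hcc] at *
    linarith
  | case2 pos k count start hk hc hge =>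
    intro κ hkk hcc hss hpos
    refine ⟨κ, pos, ?_, hpos, by rw [hkk, hcc] at hge; omega, rfl⟩
    rw [hkk, hss]

-- A's string lookup at position d = B's arithmetic digit at position d
theorem step_eq (limit : Int) (s : String) (N : ℕ)
    (hs : s.toList = champ N) (hN : (limit : Int) < ((champ N).length : Int))
    (d : Int) (h1 : 1 ≤ d) (h2 : d ≤ limit) (ha : (1 : Int) ≤ 1) (hb : (1 : Int) ≤ 9) :
    ((PySem.Str.pyGet? s d).bind (fun c => PySem.Int.ofChars? [c])).getD 0 =
      (fun t : Int × Int × Int =>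
        PySem.Int.mod (PySem.Int.floordiv (t.2.2 + PySem.Int.floordiv (t.1 - 1) t.2.1)
          (10 ^ ((t.2.1 - 1 - PySem.Int.mod (t.1 - 1) t.2.1).toNat))) 10)
        (probB_find d 1 9 1 ha hb) := by
  obtain ⟨κ, pos, heq, hp1, hp2, hsum⟩ :=
    find_inv d 1 9 1 ha hb 0 (by norm_num) (by norm_num) (by norm_num) h1
  rw [heq]
  simp only [Lsum] at hsum
  -- decompose pos - 1 = (κ+1) * q + r
  have hPd : pos - 1 = ((pos - 1).toNat : Int) := by omega
  set P : ℕ := (pos - 1).toNat with hPdef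
  set q : ℕ := P / (κ + 1) with hqdef
  set r : ℕ := P % (κ + 1) with hrdef
  have hdm : (κ + 1) * q + r = P := Nat.div_add_mod P (κ + 1)
  have hrk : r ≤ κ := by
    have : P % (κ + 1) < κ + 1 := Nat.mod_lt P (by omega)
    omega
  have hq9 : q < 9 * 10 ^ κ := by
    have hP : P < (κ + 1) * (9 * 10 ^ κ) := by
      have : (P : Int) < ((κ : Int) + 1) * (9 * 10 ^ κ) := by
        rw [← hPd]; omega
      have h10 : (((κ + 1) * (9 * 10 ^ κ) : ℕ) : Int) = ((κ : Int) + 1) * (9 * 10 ^ κ) := by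
        push_cast; ring
      omega
    rw [hqdef]
    exact Nat.div_lt_of_lt_mul hP
  -- compute B's value
  have hfd : PySem.Int.floordiv (pos - 1) ((κ : Int) + 1) = (q : Int) := by
    rw [hPd, show ((κ : Int) + 1) = ((κ + 1 : ℕ) : Int) by push_cast; ring,
      PySem.Int.floordiv_natCast]
  have hmd : PySem.Int.mod (pos - 1) ((κ : Int) + 1) = (r : Int) := by
    rw [hPd, show ((κ : Int) + 1) = ((κ + 1 : ℕ) : Int) by push_cast; ring,
      PySem.Int.mod_natCast]
  simp only [hfd, hmd]
  have hexp : (((κ : Int) + 1) - 1 - (r : Int)).toNat = κ - r := by omega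
  rw [hexp]
  have hnum : (10 : Int) ^ κ + (q : Int) = ((10 ^ κ + q : ℕ) : Int) := by push_cast; ring
  rw [hnum, show (10 : Int) ^ (κ - r) = ((10 ^ (κ - r) : ℕ) : Int) by push_cast; ring,
    PySem.Int.floordiv_natCast, show (10 : Int) = ((10 : ℕ) : Int) by norm_num,
    PySem.Int.mod_natCast]
  -- compute A's value
  have hdN : d.toNat < (champ N).length := by omega
  have hdval : d.toNat = Lsum κ + (κ + 1) * q + r := by
    have hdp : d = (P : Int) + (Lsum κ : Int) := by omega
    have h2 : Lsum κ + (κ + 1) * q + r = Lsum κ + P := by rw [Nat.add_assoc, hdm]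
    omega
  have hidxlt : Lsum κ + (κ + 1) * q + r < Lsum (κ + 1) := by
    have : (κ + 1) * q + r < 9 * 10 ^ κ * (κ + 1) := by
      calc (κ + 1) * q + r < (κ + 1) * q + (κ + 1) := by omega
        _ = (κ + 1) * (q + 1) := by ring
        _ ≤ (κ + 1) * (9 * 10 ^ κ) := Nat.mul_le_mul_left _ (by omega)
        _ = 9 * 10 ^ κ * (κ + 1) := by ring
    rw [Lsum]; omega
  have hget : (champ N)[d.toNat]? = some (Nat.digitChar ((10 ^ κ + q) / 10 ^ (κ - r) % 10)) := by
    rcases le_total N (10 ^ (κ + 1)) with hcase | hcase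
    · rw [← champ_mono N (10 ^ (κ + 1)) d.toNat hcase hdN, hdval]
      exact champ_get κ q r hq9 hrk
    · rw [champ_mono (10 ^ (κ + 1)) N d.toNat hcase
        (by rw [champ_pow_len]; omega), hdval]
      exact champ_get κ q r hq9 hrk
  rw [PySem.Str.pyGet?_eq, PySem.Chars.pyGet?_eq_listPyGet?, hs,
    PySem.List.pyGet?_of_nonneg (champ N) (i := d) (by omega), hget]
  simp only [Option.bind_some]
  rw [ofCharsDigit _ (Nat.mod_lt _ (by norm_num))]
  rfl

-- A's build loop produces champ N for some N long enough to cover the limit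
theorem build_champ (limit : Int) : ∀ (fuel : ℕ) (n : ℕ) (s : String), s.toList = champ n →
    (limit + 1 - PySem.Str.len s).toNat ≤ fuel →
    ∃ N : ℕ, (probA_build limit (n : Int) s).toList = champ N ∧
      (limit : Int) < ((champ N).length : Int) := by
  intro fuel
  induction fuel with
  | zero =>
    intro n s hs hf
    rw [probA_build]
    rw [if_neg (by rw [PySem.Str.len_eq] at *; omega)]
    exact ⟨n, hs, by rw [PySem.Str.len_eq] at hf; rw [← hs]; omega⟩
  | succ fuel ih =>
    intro n s hs hf
    rw [probA_build]
    by_cases h : PySem.Str.len s ≤ limit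
    · rw [if_pos h]
      have hs' : (s ++ PySem.Int.toStr (n : Int)).toList = champ (n + 1) := by
        rw [String.toList_append, PySem.Int.toList_toStr, hs, champ_succ]
        congr 1
      have hlen : PySem.Str.len (s ++ PySem.Int.toStr (n : Int)) =
          ((champ (n + 1)).length : Int) := by rw [PySem.Str.len_eq, hs']
      have hgrow : (champ n).length < (champ (n + 1)).length := by
        rw [champ_succ, List.length_append]
        have := pvToCharsNeNil (n : Int)
        have h0 : PySem.Int.toChars (n : Int) = Nat.toDigits 10 n := by congr 1
        rw [h0] at this
        omega
      have := ih (n + 1) (s ++ PySem.Int.toStr (n : Int)) hs' (by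
        rw [hlen]
        rw [PySem.Str.len_eq, hs] at *
        omega)
      rwa [show ((n : Int) + 1) = ((n + 1 : ℕ) : Int) by push_cast; ring]
    · rw [if_neg h]
      rw [PySem.Str.len_eq, hs] at h
      exact ⟨n, hs, by omega⟩

-- the two outer loops produce the same product
theorem loops_eq (limit : Int) (s : String) (N : ℕ)
    (hs : s.toList = champ N) (hN : (limit : Int) < ((champ N).length : Int)) :
    ∀ (fuel : ℕ) (d result : Int) (hd : 1 ≤ d), (limit + 1 - d).toNat ≤ fuel →
      probA_digits limit s d result hd = probB_loop limit d result hd := by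
  intro fuel
  induction fuel with
  | zero =>
    intro d result hd hf
    rw [probA_digits, probB_loop, if_neg (by omega), if_neg (by omega)]
  | succ fuel ih =>
    intro d result hd hf
    rw [probA_digits, probB_loop]
    by_cases h : d ≤ limit
    · rw [if_pos h, if_pos h]
      rw [step_eq limit s N hs hN d hd h (by norm_num) (by norm_num)]
      have h9 : d + 1 ≤ d * 10 := by nlinarith
      exact ih (d * 10) _ (by omega) (by omega)
    · rw [if_neg h, if_neg h]

-- ===== VERDICT (by name: the statement is the Claim_ definition above) =====
theorem problem41_spec : Claim_equal_problem41 := by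
  intro limit _
  unfold Spec_problem41 problem41 problem41_alt
  obtain ⟨N, hs, hN⟩ := build_champ limit ((limit + 1 - PySem.Str.len "").toNat) 0 ""
    (by rfl) (le_refl _)
  exact loops_eq limit _ N hs hN ((limit + 1 - 1).toNat) 1 1 (by norm_num) (le_refl _)
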